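-- pv_equiv track=rewrite | github.com/MichalFedorek420/II-rok-python | 02/zad3mock2.py | f
-- ===== SOURCE A (Python) =====
-- def f(n):
--
--     words = n.split()
--     x=[]
--     for word in words:
--         if word:
--             first_letter = word[0]
--             x.append(first_letter)
--     return "".join(x)
-- ===== SOURCE B (Python) =====
-- def f(n):
--     out = []
--     prev_was_space = True
--     for c in n:
--         if c.isspace():
--             prev_was_space = True
--         else:
--             if prev_was_space:
--                 out.append(c)
--             prev_was_space = False
--     return "".join(out)
-- ===== Notes on version B (the rewrite author's own statement) =====
-- stated objective: alternative
-- what changed: B replaces split()-then-take-first-letters with a single character scan that emits a char at each whitespace-to-nonwhitespace transition, never materializing the word list.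
import Mathlib
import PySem

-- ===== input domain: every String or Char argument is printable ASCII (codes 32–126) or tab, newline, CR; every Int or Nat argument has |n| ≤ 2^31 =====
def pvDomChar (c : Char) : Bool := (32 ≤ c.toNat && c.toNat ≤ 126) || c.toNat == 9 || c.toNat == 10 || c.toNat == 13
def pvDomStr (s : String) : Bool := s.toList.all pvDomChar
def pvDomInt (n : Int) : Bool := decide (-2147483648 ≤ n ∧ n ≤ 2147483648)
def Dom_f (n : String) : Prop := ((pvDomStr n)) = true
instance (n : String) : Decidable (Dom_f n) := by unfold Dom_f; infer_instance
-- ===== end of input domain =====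

-- B detects word starts by a whitespace→non-whitespace transition scan instead of splitting into words (alternative decomposition, same behaviour).


-- ===== PORT A =====
def f (n : String) : String :=
  let words := PySem.Str.split₀ n
  let x := words.foldl (fun (x : List String) (word : String) =>
    if word.isEmpty = false then
      match PySem.Str.pyGet? word 0 with
      | some first_letter => x ++ [String.singleton first_letter]
      | none => x
    else x) []
  PySem.Str.join "" x

-- ===== PORT B =====
def f_alt (n : String) : String :=
  let st := n.toList.foldl (fun (st : List Char × Bool) (c : Char) =>
    if PySem.Str.isspace c then (st.1, true)
    else if st.2 then (st.1 ++ [c], false) else (st.1, false)) ([], true)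
  String.ofList st.1

-- ===== PRECONDITION & SPEC =====
def Spec_f (n : String) (out : String) : Prop := out = f_alt n
instance (n : String) (out : String) : Decidable (Spec_f n out) := by unfold Spec_f; infer_instance

-- ===== CLAIM (what is proved, stated in full; the proofs are below) =====
def Claim_equal_f : Prop := ∀ (n : String), Dom_f n → Spec_f n (f n)

-- ===== LEMMAS AND PROOFS =====

/-- First letters of a word list (empty words contribute nothing). -/
def pvFirsts : List (List Char) → List Char
  | [] => []
  | w :: ws => (match w.head? with | some c => [c] | none => []) ++ pvFirsts ws

/-- B's transition scan, as a structural recursion. -/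
def pvScan : List Char → Bool → List Char
  | [], _ => []
  | c :: rest, p =>
    if PySem.Chars.isspace c then pvScan rest true
    else (if p then [c] else []) ++ pvScan rest false

theorem pvScan_inv (s : List Char) (acc : List Char) (p : Bool) :
    (s.foldl (fun (st : List Char × Bool) (c : Char) =>
      if PySem.Str.isspace c then (st.1, true)
      else if st.2 then (st.1 ++ [c], false) else (st.1, false)) (acc, p)).1
    = acc ++ pvScan s p := by
  induction s generalizing acc p with
  | nil => simp [pvScan]
  | cons c rest ih =>
    simp only [List.foldl_cons, pvScan, PySem.Str.isspace]
    by_cases hc : PySem.Chars.isspace c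
    · simpa [hc, PySem.Str.isspace] using ih acc true
    · cases p
      · simpa [hc, PySem.Str.isspace] using ih acc false
      · simpa [hc, PySem.Str.isspace] using ih (acc ++ [c]) false

theorem pvGo_acc (s : List Char) (cur : List Char) (acc : List (List Char)) :
    PySem.Chars.split₀.go s cur acc = acc.reverse ++ PySem.Chars.split₀.go s cur [] := by
  induction s generalizing cur acc with
  | nil =>
    by_cases h : cur.isEmpty <;> simp [PySem.Chars.split₀.go, h]
  | cons c rest ih =>
    by_cases hc : PySem.Chars.isspace c
    · by_cases h : cur.isEmpty
      · simp only [PySem.Chars.split₀.go, hc, h, if_true]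
        rw [ih [] acc]
      · simp only [PySem.Chars.split₀.go, hc, h, Bool.false_eq_true, if_true, if_false]
        rw [ih [] (cur.reverse :: acc), ih [] [cur.reverse]]
        simp
    · simp only [PySem.Chars.split₀.go, hc, Bool.false_eq_true, if_false]
      exact ih (c :: cur) acc

theorem pvFirsts_append (a b : List (List Char)) :
    pvFirsts (a ++ b) = pvFirsts a ++ pvFirsts b := by
  induction a with
  | nil => simp [pvFirsts]
  | cons w ws ih => simp [pvFirsts, ih]

/-- Main correspondence between A's split-based first letters and B's scan. -/
theorem pvGo_scan (s : List Char) :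
    (∀ (cs : List Char) (c0 : Char),
      pvFirsts (PySem.Chars.split₀.go s (cs ++ [c0]) []) = c0 :: pvScan s false) ∧
    pvFirsts (PySem.Chars.split₀.go s [] []) = pvScan s true := by
  induction s with
  | nil =>
    constructor
    · intro cs c0; simp [PySem.Chars.split₀.go, pvFirsts, pvScan]
    · simp [PySem.Chars.split₀.go, pvFirsts, pvScan]
  | cons c rest ih =>
    constructor
    · intro cs c0
      by_cases hc : PySem.Chars.isspace c
      · rw [pvScan]
        simp only [PySem.Chars.split₀.go, hc, if_true]
        have hne : ((cs ++ [c0]).isEmpty) = false := by simp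
        rw [hne]
        simp only [Bool.false_eq_true, if_false]
        rw [pvGo_acc rest [] [(cs ++ [c0]).reverse]]
        rw [pvFirsts_append, ih.2]
        simp [pvFirsts]
      · rw [pvScan]
        simp only [PySem.Chars.split₀.go, hc]
        have := ih.1 (c :: cs) c0
        simpa [hc] using this
    · by_cases hc : PySem.Chars.isspace c
      · rw [pvScan]
        simp only [PySem.Chars.split₀.go, hc, if_true, List.isEmpty_nil, if_true]
        exact ih.2
      · rw [pvScan]
        simp only [PySem.Chars.split₀.go, hc]
        have := ih.1 [] c
        simpa using this

theorem pvFoldA (ws : List (List Char)) (x : List String) :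
    List.foldl (fun (x : List String) (word : String) =>
      if word.isEmpty = false then
        match PySem.Str.pyGet? word 0 with
        | some first_letter => x ++ [String.singleton first_letter]
        | none => x
      else x) x (ws.map String.ofList)
    = x ++ (pvFirsts ws).map String.singleton := by
  induction ws generalizing x with
  | nil => simp [pvFirsts]
  | cons w rest ih =>
    cases w with
    | nil => simpa [pvFirsts] using ih x
    | cons a as =>
      simp only [List.map_cons, List.foldl_cons]
      rw [ih]
      simp [pvFirsts, PySem.Str.pyGet?, PySem.Chars.pyGet?, PySem.List.pyGet?,
        PySem.List.pyIdx?, String.isEmpty, String.singleton]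

theorem pvJoin_singletons (cs : List Char) :
    PySem.Str.join "" (cs.map String.singleton) = String.ofList cs := by
  have h : List.map String.toList (cs.map String.singleton) = cs.map (fun c => [c]) := by
    simp [String.singleton]
  unfold PySem.Str.join
  rw [h, show ("" : String).toList = [] from rfl, PySem.Chars.join_nil_singletons]

-- ===== VERDICT (by name: the statement is the Claim_ definition above) =====
theorem f_spec : Claim_equal_f := by
  intro n _
  unfold Spec_f f f_alt
  dsimp only
  rw [pvScan_inv]
  rw [show PySem.Str.split₀ n = (PySem.Chars.split₀ n.toList).map String.ofList from rfl]
  rw [pvFoldA]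
  simp only [List.nil_append]
  rw [pvJoin_singletons, PySem.Chars.split₀, (pvGo_scan n.toList).2]
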